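-- pv_equiv track=rewrite | github.com/anbr1x/Portafolio | ETL projects/EAs_producion.py | MostCL_prefix
-- ===== SOURCE A (Python) =====
-- from collections import defaultdict
--
-- def contar_prefijos(lista):
--         contador = defaultdict(int)
--         for cadena in lista:
--             for i in range(1, len(cadena) + 1):
--                 prefijo = cadena[:i]
--                 contador[prefijo] += 1
--         return contador
--
-- def MostCL_prefix(lista : list):
--     b = 0
--     list_n = []
--     list_n1 = {}
--     contador = contar_prefijos(lista)
--     for key in contador.keys():
--        ###Aqui iria la nueva condicional###
--         if contador[key] < b:
--                list_n.append(key)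
--         b = contador[key]
--     claves = list(contador.keys())
--     for clave_dada in list_n:
--            indice = claves.index(clave_dada)
--            clave_anterior = claves[indice - 1]
--            #list_n.append(clave_anterior)
--            list_n1[clave_anterior] = contador[clave_anterior]
--     return list_n1,contador
-- ===== SOURCE B (Python) =====
-- from collections import defaultdict
--
-- def contar_prefijos(lista):
--     contador = defaultdict(int)
--     for cadena in lista:
--         for i in range(1, len(cadena) + 1):
--             contador[cadena[:i]] += 1
--     return contador
--
-- def MostCL_prefix(lista: list):
--     contador = contar_prefijos(lista)
--     list_n1 = {}
--     prev_key = ""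
--     b = 0
--     for key, v in contador.items():
--         if v < b:
--             list_n1[prev_key] = b
--         prev_key = key
--         b = v
--     return list_n1, contador
-- ===== Notes on version B (the rewrite author's own statement) =====
-- stated objective: faster
-- what changed: Replaces A's three passes (build list_n of drop keys, then re-scan the key list with list.index to find each predecessor and look it up) by a single pass over contador.items() that tracks the previous key and its count and records (prev_key, prev_count) directly whenever the count drops, eliminating list_n, claves and the list.index scan.
import Mathlib
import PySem

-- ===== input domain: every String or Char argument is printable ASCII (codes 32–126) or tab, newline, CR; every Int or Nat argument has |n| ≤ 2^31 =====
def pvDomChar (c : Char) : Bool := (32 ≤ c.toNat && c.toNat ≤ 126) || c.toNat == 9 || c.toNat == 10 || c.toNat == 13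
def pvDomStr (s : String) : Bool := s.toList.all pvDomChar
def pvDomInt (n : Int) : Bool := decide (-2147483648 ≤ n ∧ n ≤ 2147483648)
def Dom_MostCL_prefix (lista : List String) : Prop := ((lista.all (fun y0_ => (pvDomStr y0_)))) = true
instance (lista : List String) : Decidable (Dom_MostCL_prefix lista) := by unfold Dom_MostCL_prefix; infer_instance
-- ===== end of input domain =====

-- B replaces A's three passes (drop-key list, list.index scan for predecessors, lookups) by one pass
-- over contador.items() tracking the previous key and count (objective: simpler). Dicts are returned as
-- their items lists under the type convention.

-- ===== PORT A =====
def contar_prefijos (lista : List String) : PySem.Dict String Int :=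
  lista.foldl (fun contador cadena =>
    (PySem.List.pyRange 1 (PySem.Str.len cadena + 1) 1).foldl
      (fun contador i => contador.modify (PySem.Str.slice cadena none (some i)) 0 (· + 1))
      contador)
    PySem.Dict.empty

def MostCL_prefix (lista : List String) : (List (String × Int)) × (List (String × Int)) :=
  let contador := contar_prefijos lista
  -- first loop: state is (b, list_n)
  let st := contador.keys.foldl
    (fun (s : Int × List String) key =>
      (contador.getD key 0, if contador.getD key 0 < s.1 then s.2 ++ [key] else s.2))
    (0, [])
  let list_n := st.2
  let claves := contador.keys
  -- second loop; claves.index never fails (every clave_dada ∈ claves) and indice ≥ 1, so the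
  -- .getD 0 / default "" branches of index?/pyGetD are never taken
  let list_n1 := list_n.foldl
    (fun (d : PySem.Dict String Int) clave_dada =>
      let indice : Int := ((PySem.List.index? claves clave_dada).getD 0 : Nat)
      let clave_anterior := PySem.List.pyGetD claves (indice - 1) ""
      d.insert clave_anterior (contador.getD clave_anterior 0))
    PySem.Dict.empty
  (list_n1.items, contador.items)

-- ===== PORT B =====
def contar_prefijos_alt (lista : List String) : PySem.Dict String Int :=
  lista.foldl (fun contador cadena =>
    (PySem.List.pyRange 1 (PySem.Str.len cadena + 1) 1).foldl
      (fun contador i => contador.modify (PySem.Str.slice cadena none (some i)) 0 (· + 1))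
      contador)
    PySem.Dict.empty

def MostCL_prefix_alt (lista : List String) : (List (String × Int)) × (List (String × Int)) :=
  let contador := contar_prefijos_alt lista
  -- single pass: state is (list_n1, prev_key, b)
  let st := contador.items.foldl
    (fun (s : PySem.Dict String Int × String × Int) kv =>
      ((if kv.2 < s.2.2 then s.1.insert s.2.1 s.2.2 else s.1), kv.1, kv.2))
    (PySem.Dict.empty, "", 0)
  (st.1.items, contador.items)

-- ===== PRECONDITION & SPEC =====
def Spec_MostCL_prefix (lista : List String) (out : (List (String × Int)) × (List (String × Int))) : Prop := out = MostCL_prefix_alt lista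
instance (lista : List String) (out : (List (String × Int)) × (List (String × Int))) : Decidable (Spec_MostCL_prefix lista out) := by unfold Spec_MostCL_prefix; infer_instance

-- ===== CLAIM (what is proved, stated in full; the proofs are below) =====
def Claim_equal_MostCL_prefix : Prop := ∀ (lista : List String), Dom_MostCL_prefix lista → Spec_MostCL_prefix lista (MostCL_prefix lista)

-- ===== LEMMAS AND PROOFS =====

-- the pairs (previous key, previous count) recorded at each count drop, scanned with prev = (p, b)
def pvAdj (p : String) (b : Int) : List (String × Int) → List (String × Int)
  | [] => []
  | (k, v) :: t => (if v < b then [(p, b)] else []) ++ pvAdj k v t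

-- the drop keys themselves (A's list_n), scanned with previous count b
def pvLn (b : Int) : List (String × Int) → List String
  | [] => []
  | (k, v) :: t => (if v < b then [k] else []) ++ pvLn v t

theorem pvAdj_keys_sublist (t : List (String × Int)) : ∀ (p : String) (b : Int),
    ((pvAdj p b t).map Prod.fst).Sublist (p :: t.map Prod.fst) := by
  induction t with
  | nil => intro p b; simp [pvAdj]
  | cons kv t ih =>
    intro p b
    obtain ⟨k, v⟩ := kv
    simp only [pvAdj, List.map_append, List.map_cons]
    by_cases h : v < b
    · simpa [h] using (ih k v).cons₂ p
    · simpa [h] using ((ih k v).cons p)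

-- A's first loop over contador.keys computes pvLn
theorem pvFoldA (d : PySem.Dict String Int) (l : List (String × Int))
    (hget : ∀ p ∈ l, d.getD p.1 0 = p.2) : ∀ (b : Int) (acc : List String),
    ((l.map Prod.fst).foldl
      (fun (s : Int × List String) key =>
        (d.getD key 0, if d.getD key 0 < s.1 then s.2 ++ [key] else s.2))
      (b, acc)).2 = acc ++ pvLn b l := by
  induction l with
  | nil => intro b acc; simp [pvLn]
  | cons kv t ih =>
    intro b acc
    obtain ⟨k, v⟩ := kv
    have hk : d.getD k 0 = v := hget (k, v) (by simp)
    have ih' := ih (fun p hp => hget p (List.mem_cons_of_mem _ hp))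
    by_cases h : v < b
    · simp [pvLn, hk, h, ih']
    · simp [pvLn, hk, h, ih']

-- B's single pass builds exactly the dict whose items are pvAdj p b t
theorem pvFoldB (t : List (String × Int)) : ∀ (d : PySem.Dict String Int) (p : String) (b : Int),
    (∀ x ∈ p :: t.map Prod.fst, d.contains x = false) →
    (p :: t.map Prod.fst).Nodup →
    ((t.foldl
      (fun (s : PySem.Dict String Int × String × Int) kv =>
        ((if kv.2 < s.2.2 then s.1.insert s.2.1 s.2.2 else s.1), kv.1, kv.2))
      (d, p, b)).1).items = d.items ++ pvAdj p b t := by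
  induction t with
  | nil => intro d p b _ _; simp [pvAdj]
  | cons kv t ih =>
    intro d p b hfresh hnd
    obtain ⟨k, v⟩ := kv
    have hpk : p ∉ k :: t.map Prod.fst := by
      simpa using (List.nodup_cons.mp hnd).1
    have hnd' : (k :: t.map Prod.fst).Nodup := by
      simpa using (List.nodup_cons.mp hnd).2
    by_cases h : v < b
    · have hpfresh : d.contains p = false := hfresh p (by simp)
      have hfresh' : ∀ x ∈ k :: t.map Prod.fst, (d.insert p b).contains x = false := by
        intro x hx
        rw [PySem.Dict.contains_insert]
        have hxp : x ≠ p := fun hxp => hpk (hxp ▸ hx)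
        simp [hxp, hfresh x (List.mem_cons_of_mem _ hx)]
      have := ih (d.insert p b) k v hfresh' hnd'
      simp only [List.foldl_cons, pvAdj, if_pos h]
      rw [this, PySem.Dict.items_insert_of_not_contains d b hpfresh]
      simp
    · have hfresh' : ∀ x ∈ k :: t.map Prod.fst, d.contains x = false :=
        fun x hx => hfresh x (List.mem_cons_of_mem _ hx)
      have := ih d k v hfresh' hnd'
      simp only [List.foldl_cons, if_neg h]
      rw [this]
      simp [pvAdj, h]

-- in A's second loop, mapping each drop key to (predecessor, its count) gives pvAdj
theorem pvMapPred (d : PySem.Dict String Int) (L : List (String × Int))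
    (hnd : (L.map Prod.fst).Nodup)
    (hget : ∀ p ∈ L, d.getD p.1 0 = p.2) :
    ∀ (t : List (String × Int)) (P : List (String × Int)) (k : String) (v : Int),
    L = P ++ (k, v) :: t →
    (pvLn v t).map (fun kd =>
      (PySem.List.pyGetD (L.map Prod.fst) (((PySem.List.index? (L.map Prod.fst) kd).getD 0 : Nat) - 1) "",
        d.getD (PySem.List.pyGetD (L.map Prod.fst) (((PySem.List.index? (L.map Prod.fst) kd).getD 0 : Nat) - 1) "") 0))
      = pvAdj k v t := by
  intro t
  induction t with
  | nil => intro P k v _; simp [pvLn, pvAdj]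
  | cons kv t2 ih =>
    intro P k v hL
    obtain ⟨k2, v2⟩ := kv
    have ih' := ih (P ++ [(k, v)]) k2 v2 (by simpa using hL)
    have hclaves : L.map Prod.fst = P.map Prod.fst ++ k :: k2 :: t2.map Prod.fst := by
      subst hL; simp
    by_cases h : v2 < v
    · -- the drop key k2 maps to (k, v)
      have hnd2 : ((P.map Prod.fst ++ [k]) ++ k2 :: t2.map Prod.fst).Nodup := by
        rw [hclaves] at hnd; simpa using hnd
      have hk2notin : k2 ∉ P.map Prod.fst ++ [k] := by
        intro hmem
        exact (List.disjoint_of_nodup_append hnd2) hmem (by simp)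
      have hidx : PySem.List.index? (L.map Prod.fst) k2 = some (P.length + 1) := by
        rw [PySem.List.index?_eq_some_iff]
        exact ⟨P.map Prod.fst ++ [k], t2.map Prod.fst, by simp [hclaves], by simp, hk2notin⟩
      have hpred : PySem.List.pyGetD (L.map Prod.fst) (((PySem.List.index? (L.map Prod.fst) k2).getD 0 : Nat) - 1) "" = k := by
        rw [hidx]
        have : (((P.length + 1 : Nat) : Int) - 1) = ((P.length : Nat) : Int) := by push_cast; ring
        rw [Option.getD_some, this, PySem.List.pyGetD_natCast]
        rw [hclaves]
        simp [List.getD]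
      have hkv : d.getD k 0 = v := hget (k, v) (by simp [hL])
      simp only [pvLn, pvAdj, if_pos h, List.map_cons, List.singleton_append]
      rw [hpred, hkv, ih']
    · simp only [pvLn, pvAdj, if_neg h, List.nil_append]
      exact ih'

-- keys stay unique through contar_prefijos' nested modify loops
theorem pvNodupFold (lista : List String) : ∀ (d0 : PySem.Dict String Int), d0.keys.Nodup →
    (lista.foldl (fun contador cadena =>
      (PySem.List.pyRange 1 (PySem.Str.len cadena + 1) 1).foldl
        (fun contador i => contador.modify (PySem.Str.slice cadena none (some i)) 0 (· + 1))
        contador) d0).keys.Nodup := by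
  induction lista with
  | nil => intro d0 h; exact h
  | cons s t ih =>
    intro d0 h
    simp only [List.foldl_cons]
    exact ih _ (PySem.Dict.nodup_keys_foldl_modify_key _
      (fun i => PySem.Str.slice s none (some i)) 0 (fun _ _ => (· + 1)) d0 h)

theorem pvNodupContar (lista : List String) : (contar_prefijos lista).keys.Nodup :=
  pvNodupFold lista PySem.Dict.empty PySem.Dict.nodup_keys_empty

-- nonnegativity of every count is preserved by a modify-increment loop
theorem pvNonnegInner (l : List Int) (key : Int → String) :
    ∀ (d : PySem.Dict String Int), (∀ k, 0 ≤ d.getD k 0) →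
    ∀ k, 0 ≤ (l.foldl (fun d i => d.modify (key i) 0 (· + 1)) d).getD k 0 := by
  induction l with
  | nil => intro d h k; exact h k
  | cons i t ih =>
    intro d h k
    simp only [List.foldl_cons]
    refine ih _ (fun k' => ?_) k
    rw [PySem.Dict.getD_modify]
    split_ifs
    · linarith [h (key i)]
    · exact h k'

-- values of contar_prefijos are nonnegative
theorem pvNonnegContar (lista : List String) : ∀ k, 0 ≤ (contar_prefijos lista).getD k 0 := by
  unfold contar_prefijos
  generalize hd : PySem.Dict.empty = d0
  have h0 : ∀ k, 0 ≤ (d0 : PySem.Dict String Int).getD k 0 := by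
    intro k; rw [← hd, PySem.Dict.getD_empty]
  clear hd
  induction lista generalizing d0 with
  | nil => exact h0
  | cons s t ih =>
    simp only [List.foldl_cons]
    exact ih _ (pvNonnegInner _ (fun i => PySem.Str.slice s none (some i)) d0 h0)

-- ===== VERDICT (by name: the statement is the Claim_ definition above) =====
theorem MostCL_prefix_spec : Claim_equal_MostCL_prefix := by
  intro lista _
  show MostCL_prefix lista = MostCL_prefix_alt lista
  have hc : contar_prefijos_alt lista = contar_prefijos lista := rfl
  simp only [MostCL_prefix, MostCL_prefix_alt, hc]
  set dct := contar_prefijos lista with hdct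
  have hnd : dct.keys.Nodup := pvNodupContar lista
  have hkeys : dct.keys = dct.items.map Prod.fst := by
    simp [PySem.Dict.keys]
  have hndl : (dct.items.map Prod.fst).Nodup := hkeys ▸ hnd
  have hget : ∀ p ∈ dct.items, dct.getD p.1 0 = p.2 := by
    intro p hp
    obtain ⟨k, v⟩ := p
    exact PySem.Dict.getD_of_mem_items dct hp hnd 0
  have hnn : ∀ p ∈ dct.items, (0 : Int) ≤ p.2 := by
    intro p hp
    have := hget p hp
    rw [← this]
    exact pvNonnegContar lista p.1
  have hmappred := pvMapPred dct dct.items hndl hget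
  simp only [Prod.mk.injEq]
  refine ⟨?_, trivial⟩
  rw [hkeys, pvFoldA dct dct.items hget 0 [], List.nil_append]
  generalize hl : dct.items = l at hndl hget hnn hmappred ⊢
  cases l with
  | nil => simp [pvLn]
  | cons kv t =>
    obtain ⟨k0, v0⟩ := kv
    have hv0 : ¬ (v0 < 0) := not_lt.mpr (hnn (k0, v0) (by simp))
    have hnd0 : (k0 :: t.map Prod.fst).Nodup := by simpa using hndl
    -- left side: A's second loop
    have hA := PySem.Dict.items_foldl_insert_fresh (pvLn v0 t)
      (fun kd => PySem.List.pyGetD (((k0, v0) :: t).map Prod.fst)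
        (((PySem.List.index? (((k0, v0) :: t).map Prod.fst) kd).getD 0 : Nat) - 1) "")
      (fun kd => dct.getD (PySem.List.pyGetD (((k0, v0) :: t).map Prod.fst)
        (((PySem.List.index? (((k0, v0) :: t).map Prod.fst) kd).getD 0 : Nat) - 1) "") 0)
      PySem.Dict.empty
      (fun kd _ => PySem.Dict.contains_empty _)
      (by
        have hmap := hmappred t [] k0 v0 (by simp)
        have hmk : (pvLn v0 t).map (fun kd => PySem.List.pyGetD (((k0, v0) :: t).map Prod.fst)
            (((PySem.List.index? (((k0, v0) :: t).map Prod.fst) kd).getD 0 : Nat) - 1) "")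
            = (pvAdj k0 v0 t).map Prod.fst := by
          have := congrArg (List.map Prod.fst) hmap
          simpa [List.map_map, Function.comp] using this
        rw [hmk]
        exact (pvAdj_keys_sublist t k0 v0).nodup hnd0)
    -- right side: B's single pass
    have hB := pvFoldB t PySem.Dict.empty k0 v0
      (fun x _ => PySem.Dict.contains_empty _)
      hnd0
    simp only [pvLn, if_neg hv0, List.nil_append, List.foldl_cons] at hA ⊢
    rw [hA, hB, hmappred t [] k0 v0 (by simp)]
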